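-- pv_equiv track=rewrite | github.com/FaijulAmin/ttsky-NeuronCrunch | test/test.py | golden_2x2_relu
-- ===== SOURCE A (Python) =====
-- def to_int8(v):
--     v = int(v) & 0xFF
--     return v - 256 if v >= 128 else v
--
-- def wrap20(v):
--     v = int(v) & 0xFFFFF
--     return v - 0x100000 if v >= 0x80000 else v
--
-- def golden_2x2_relu(A, B):
--     C = [[0,0],[0,0]]
--     for i in range(2):
--         for j in range(2):
--             acc = sum(to_int8(A[i][k]) * to_int8(B[k][j]) for k in range(2))
--             val = wrap20(acc)
--             C[i][j] = 0 if val < 0 else val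
--     return C
-- ===== SOURCE B (Python) =====
-- def to_int8(v):
--     v = int(v) & 0xFF
--     return v - 256 if v >= 128 else v
--
-- def golden_2x2_relu(A, B):
--     # Sign-extend entries (same element accesses as A, so same IndexError behaviour).
--     a00, a01 = to_int8(A[0][0]), to_int8(A[0][1])
--     a10, a11 = to_int8(A[1][0]), to_int8(A[1][1])
--     b00, b01 = to_int8(B[0][0]), to_int8(B[0][1])
--     b10, b11 = to_int8(B[1][0]), to_int8(B[1][1])
--     # Strassen's 2x2 multiplication: 7 products instead of 8.
--     m1 = (a00 + a11) * (b00 + b11)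
--     m2 = (a10 + a11) * b00
--     m3 = a00 * (b01 - b11)
--     m4 = a11 * (b10 - b00)
--     m5 = (a00 + a01) * b11
--     m6 = (a10 - a00) * (b00 + b01)
--     m7 = (a01 - a11) * (b10 + b11)
--     # wrap20 is redundant: |dot product| <= 2*128*128 = 32768 < 2**19, so only ReLU remains.
--     return [[max(m1 + m4 - m5 + m7, 0), max(m3 + m5, 0)],
--             [max(m2 + m4, 0), max(m1 - m2 + m3 + m6, 0)]]
-- ===== Notes on version B (the rewrite author's own statement) =====
-- stated objective: alternative
-- what changed: B sign-extends the eight entries once and then uses Strassen's 2x2 scheme (7 products and linear combinations instead of 8 inner-product multiplications), dropping wrap20 which is provably redundant (|dot| <= 2*128*128 < 2^19), applying ReLU via max.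
-- outside the precondition, e.g. on golden_2x2_relu([[1, 2], [3, 4]], [[1, 2]]): A raises IndexError, B raises IndexError
import Mathlib
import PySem

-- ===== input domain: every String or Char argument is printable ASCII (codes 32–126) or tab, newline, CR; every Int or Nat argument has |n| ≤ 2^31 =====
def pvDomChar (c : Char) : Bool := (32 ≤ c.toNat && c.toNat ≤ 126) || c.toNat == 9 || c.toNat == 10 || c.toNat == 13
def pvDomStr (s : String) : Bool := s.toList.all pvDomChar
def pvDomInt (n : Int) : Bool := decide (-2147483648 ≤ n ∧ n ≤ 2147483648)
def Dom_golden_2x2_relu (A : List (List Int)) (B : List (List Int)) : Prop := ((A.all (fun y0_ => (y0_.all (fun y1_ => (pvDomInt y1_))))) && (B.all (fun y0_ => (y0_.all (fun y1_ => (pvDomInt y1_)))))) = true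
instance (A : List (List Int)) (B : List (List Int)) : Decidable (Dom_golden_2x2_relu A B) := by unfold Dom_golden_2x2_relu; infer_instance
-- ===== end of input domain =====

-- B sign-extends the entries once, then computes the 2x2 product with Strassen's 7-product
-- scheme and ReLU via max, dropping wrap20 (redundant: |dot| ≤ 2*128*128 < 2^19); objective: alternative.


-- ===== PORT A =====
-- 'int(v) & 0xFF' on an int is exactly v % 256 (Python % with positive divisor); same for & 0xFFFFF.
def to_int8 (v : Int) : Int :=
  let v := v % 256
  if v ≥ 128 then v - 256 else v

def wrap20 (v : Int) : Int :=
  let v := v % 1048576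
  if v ≥ 524288 then v - 1048576 else v

-- indexing helper; Pre_ guarantees all accesses are in range, so the defaults are unreachable
-- (out-of-range indexing raises IndexError in Python and is excluded by Pre_).
def idx (M : List (List Int)) (i k : Nat) : Int := (M.getD i []).getD k 0

-- literal transliteration of A: for each (i,j), sum over k of to_int8(A[i][k])*to_int8(B[k][j]),
-- then wrap20, then '0 if val < 0 else val'.
def golden_2x2_relu (A : List (List Int)) (B : List (List Int)) : List (List Int) :=
  let cell (i j : Nat) : Int :=
    let acc := (List.range 2).foldl (fun s k => s + to_int8 (idx A i k) * to_int8 (idx B k j)) 0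
    let val := wrap20 acc
    if val < 0 then 0 else val
  (List.range 2).map (fun i => (List.range 2).map (fun j => cell i j))

-- ===== PORT B =====
-- Strassen's 2x2 multiplication on the sign-extended entries; ReLU via max.
def golden_2x2_relu_alt (A : List (List Int)) (B : List (List Int)) : List (List Int) :=
  let a00 := to_int8 (idx A 0 0); let a01 := to_int8 (idx A 0 1)
  let a10 := to_int8 (idx A 1 0); let a11 := to_int8 (idx A 1 1)
  let b00 := to_int8 (idx B 0 0); let b01 := to_int8 (idx B 0 1)
  let b10 := to_int8 (idx B 1 0); let b11 := to_int8 (idx B 1 1)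
  let m1 := (a00 + a11) * (b00 + b11)
  let m2 := (a10 + a11) * b00
  let m3 := a00 * (b01 - b11)
  let m4 := a11 * (b10 - b00)
  let m5 := (a00 + a01) * b11
  let m6 := (a10 - a00) * (b00 + b01)
  let m7 := (a01 - a11) * (b10 + b11)
  [[max (m1 + m4 - m5 + m7) 0, max (m3 + m5) 0],
   [max (m2 + m4) 0, max (m1 - m2 + m3 + m6) 0]]

-- ===== PRECONDITION & SPEC =====
-- Pre_ excludes exactly the inputs where Python A raises IndexError: both matrices need at
-- least 2 rows and their first two rows need at least 2 entries.
def Pre_golden_2x2_relu (A : List (List Int)) (B : List (List Int)) : Prop :=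
  2 ≤ A.length ∧ 2 ≤ B.length ∧
  2 ≤ (A.getD 0 []).length ∧ 2 ≤ (A.getD 1 []).length ∧
  2 ≤ (B.getD 0 []).length ∧ 2 ≤ (B.getD 1 []).length
instance (A : List (List Int)) (B : List (List Int)) : Decidable (Pre_golden_2x2_relu A B) := by unfold Pre_golden_2x2_relu; infer_instance

def pvWitness_golden_2x2_relu : List (List Int) × List (List Int) :=
  ([[1, -2], [300, 4]], [[-5, 6], [7, -128]])

def Spec_golden_2x2_relu (A : List (List Int)) (B : List (List Int)) (out : List (List Int)) : Prop := out = golden_2x2_relu_alt A B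
instance (A : List (List Int)) (B : List (List Int)) (out : List (List Int)) : Decidable (Spec_golden_2x2_relu A B out) := by unfold Spec_golden_2x2_relu; infer_instance

-- ===== CLAIM (what is proved, stated in full; the proofs are below) =====
def Claim_equal_golden_2x2_relu : Prop := ∀ (A : List (List Int)) (B : List (List Int)), Dom_golden_2x2_relu A B → Pre_golden_2x2_relu A B → Spec_golden_2x2_relu A B (golden_2x2_relu A B)

-- ===== LEMMAS AND PROOFS =====
lemma to_int8_bounds (v : Int) : -128 ≤ to_int8 v ∧ to_int8 v ≤ 127 := by
  simp only [to_int8]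
  have h1 : 0 ≤ v % 256 := Int.emod_nonneg v (by norm_num)
  have h2 : v % 256 < 256 := Int.emod_lt_of_pos v (by norm_num)
  split_ifs <;> omega

lemma wrap20_id (v : Int) (h1 : -524288 ≤ v) (h2 : v ≤ 524287) : wrap20 v = v := by
  simp only [wrap20]
  split_ifs with h <;> omega

lemma prod_bounds (x y : Int) : -16256 ≤ to_int8 x * to_int8 y ∧ to_int8 x * to_int8 y ≤ 16384 := by
  obtain ⟨hx1, hx2⟩ := to_int8_bounds x
  obtain ⟨hy1, hy2⟩ := to_int8_bounds y
  constructor <;> nlinarith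

-- A's cell: wrap20 is the identity on the dot product, and the branch is max with 0.
lemma relu_cell (x y z w : Int) :
    (if wrap20 (to_int8 x * to_int8 y + to_int8 z * to_int8 w) < 0 then 0
     else wrap20 (to_int8 x * to_int8 y + to_int8 z * to_int8 w)) =
    max (to_int8 x * to_int8 y + to_int8 z * to_int8 w) 0 := by
  obtain ⟨h1, h2⟩ := prod_bounds x y
  obtain ⟨h3, h4⟩ := prod_bounds z w
  rw [wrap20_id _ (by omega) (by omega)]
  by_cases h : 0 ≤ to_int8 x * to_int8 y + to_int8 z * to_int8 w
  · rw [if_neg (by omega), max_eq_left h]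
  · rw [if_pos (by omega), max_eq_right (by omega)]

-- Strassen's combinations reconstruct the four dot products.
lemma strassen_c00 (a00 a01 a11 b00 b10 b11 : Int) :
    (a00 + a11) * (b00 + b11) + a11 * (b10 - b00) - (a00 + a01) * b11
      + (a01 - a11) * (b10 + b11) = a00 * b00 + a01 * b10 := by ring

lemma strassen_c01 (a00 a01 b01 b11 : Int) :
    a00 * (b01 - b11) + (a00 + a01) * b11 = a00 * b01 + a01 * b11 := by ring

lemma strassen_c10 (a10 a11 b00 b10 : Int) :
    (a10 + a11) * b00 + a11 * (b10 - b00) = a10 * b00 + a11 * b10 := by ring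

lemma strassen_c11 (a00 a10 a11 b00 b01 b11 : Int) :
    (a00 + a11) * (b00 + b11) - (a10 + a11) * b00 + a00 * (b01 - b11)
      + (a10 - a00) * (b00 + b01) = a10 * b01 + a11 * b11 := by ring

-- ===== VERDICT (by name: the statement is the Claim_ definition above) =====
theorem golden_2x2_relu_spec : Claim_equal_golden_2x2_relu := by
  intro A B _ _
  unfold Spec_golden_2x2_relu golden_2x2_relu golden_2x2_relu_alt
  simp only [List.range, List.range.loop, List.map, List.foldl, zero_add]
  rw [strassen_c00, strassen_c01, strassen_c10, strassen_c11]
  rw [← relu_cell, ← relu_cell, ← relu_cell, ← relu_cell]
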